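-- pv_equiv track=rewrite | github.com/Toycartoon/baekjoon-solved | Python/백준/Gold/16974. 레벨 햄버거/레벨 햄버거.py | f
-- ===== SOURCE A (Python) =====
-- def get_len(l):
--     if l == 0:
--         return 1
--     return get_len(l-1) * 2 + 3
--
-- def get_p(l):
--     if l == 0:
--         return 1
--     return 2 * get_p(l-1) + 1
--
-- def f(l, p):
--     len_h = get_len(l)
--     if l == 0:
--         return 1
--
--     if p == 1:
--         return 0
--     elif 1 < p <= (len_h - 3) // 2 + 1:
--         return f(l-1, p - 1)
--     elif p == (len_h - 3) // 2 + 2: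
--         return get_p(l-1) + 1
--     elif p <= (len_h - 3) + 2:
--         return f(l-1, p-2-get_len(l-1)) + get_p(l-1) + 1
--     else:
--         return get_p(l-1) * 2 + 1
-- ===== SOURCE B (Python) =====
-- def f(l, p):
--     # Precompute (length, patties) of levels 0..l-1 once, then one descent.
--     tables = []
--     half, pat = 1, 1
--     for _ in range(l):
--         tables.append((half, pat))
--         half, pat = 2 * half + 3, 2 * pat + 1
--     acc, q = 0, p
--     for half, pat in reversed(tables):
--         if q == 1:
--             return acc
--         if 1 < q <= half + 1:
--             q -= 1
--         elif q == half + 2: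
--             return acc + pat + 1
--         elif q <= 2 * half + 2:
--             acc += pat + 1
--             q -= half + 2
--         else:
--             return acc + 2 * pat + 1
--     return acc + 1
-- ===== Notes on version B (the rewrite author's own statement) =====
-- stated objective: faster
-- what changed: Replaced the recursive descent that recomputes get_len/get_p at every level (O(l) each) by a single O(l) precomputation of the (length, patties) table followed by one iterative descent with an accumulator.
import Mathlib
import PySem

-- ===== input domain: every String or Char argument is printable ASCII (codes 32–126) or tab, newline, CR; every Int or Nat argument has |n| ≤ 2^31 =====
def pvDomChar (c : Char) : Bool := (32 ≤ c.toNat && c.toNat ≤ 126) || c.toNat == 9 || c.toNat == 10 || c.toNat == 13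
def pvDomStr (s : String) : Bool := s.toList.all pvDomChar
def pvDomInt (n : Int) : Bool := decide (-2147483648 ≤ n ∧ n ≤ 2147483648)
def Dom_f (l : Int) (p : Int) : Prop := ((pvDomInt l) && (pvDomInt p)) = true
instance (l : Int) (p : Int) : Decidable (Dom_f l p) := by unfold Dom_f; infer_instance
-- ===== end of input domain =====

-- B precomputes the level tables once and descends iteratively (O(l) vs A's O(l^2)).

-- ===== PORT A =====
-- get_len / get_p / f recurse on l-1 from l ≥ 0; the recursion is carried by the Nat
-- measure l.toNat (Pre_f restricts to l ≥ 0, where Python's recursion terminates).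
def get_len : Nat → Int
  | 0 => 1
  | n + 1 => get_len n * 2 + 3

def get_p : Nat → Int
  | 0 => 1
  | n + 1 => 2 * get_p n + 1

def fA : Nat → Int → Int
  | 0, _ => 1
  | n + 1, p =>
    let len_h := get_len (n + 1)
    if p = 1 then 0
    else if 1 < p ∧ p ≤ PySem.Int.floordiv (len_h - 3) 2 + 1 then fA n (p - 1)
    else if p = PySem.Int.floordiv (len_h - 3) 2 + 2 then get_p n + 1
    else if p ≤ (len_h - 3) + 2 then fA n (p - 2 - get_len n) + get_p n + 1
    else get_p n * 2 + 1

def f (l : Int) (p : Int) : Int := fA l.toNat p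

-- ===== PORT B =====
-- the ascending table [(len_0,pat_0), …, (len_{l-1},pat_{l-1})], built front-to-back
def tablesAux : Nat → Int → Int → List (Int × Int)
  | 0, _, _ => []
  | n + 1, h, t => (h, t) :: tablesAux n (2 * h + 3) (2 * t + 1)

-- the descent loop over reversed(tables); early returns become result values
def loopB : List (Int × Int) → Int → Int → Int
  | [], _, acc => acc + 1
  | (half, pat) :: rest, q, acc =>
    if q = 1 then acc
    else if 1 < q ∧ q ≤ half + 1 then loopB rest (q - 1) acc
    else if q = half + 2 then acc + pat + 1
    else if q ≤ 2 * half + 2 then loopB rest (q - (half + 2)) (acc + (pat + 1))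
    else acc + 2 * pat + 1

def f_alt (l : Int) (p : Int) : Int := loopB (tablesAux l.toNat 1 1).reverse p 0

-- ===== PRECONDITION & SPEC =====
-- Python A's recursion never reaches the base case for l < 0 (RecursionError)
def Pre_f (l : Int) (_p : Int) : Prop := 0 ≤ l
instance (l : Int) (p : Int) : Decidable (Pre_f l p) := by unfold Pre_f; infer_instance
def pvWitness_f : Int × Int := (3, 5)

def Spec_f (l : Int) (p : Int) (out : Int) : Prop := out = f_alt l p
instance (l : Int) (p : Int) (out : Int) : Decidable (Spec_f l p out) := by unfold Spec_f; infer_instance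

-- ===== CLAIM (what is proved, stated in full; the proofs are below) =====
def Claim_equal_f : Prop := ∀ (l : Int) (p : Int), Dom_f l p → Pre_f l p → Spec_f l p (f l p)

-- ===== LEMMAS AND PROOFS =====

-- iterated table-building maps, used to characterise tablesAux
def iterLen : Nat → Int → Int
  | 0, h => h
  | n + 1, h => iterLen n (2 * h + 3)

def iterPat : Nat → Int → Int
  | 0, t => t
  | n + 1, t => iterPat n (2 * t + 1)

theorem iterLen_one : ∀ n, iterLen n 1 = get_len n := by
  have step : ∀ n h, iterLen (n + 1) h = 2 * iterLen n h + 3 := by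
    intro n
    induction n with
    | zero => intro h; simp [iterLen]
    | succ m ih => intro h; rw [show iterLen (m+2) h = iterLen (m+1) (2*h+3) from rfl, ih]; rfl
  intro n
  induction n with
  | zero => rfl
  | succ m ih => rw [step, ih, get_len]; ring

theorem iterPat_one : ∀ n, iterPat n 1 = get_p n := by
  have step : ∀ n t, iterPat (n + 1) t = 2 * iterPat n t + 1 := by
    intro n
    induction n with
    | zero => intro t; simp [iterPat]
    | succ m ih => intro t; rw [show iterPat (m+2) t = iterPat (m+1) (2*t+1) from rfl, ih]; rfl
  intro n
  induction n with
  | zero => rfl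
  | succ m ih => rw [step, ih, get_p]

theorem tablesAux_succ (n : Nat) :
    tablesAux (n + 1) 1 1 = tablesAux n 1 1 ++ [(get_len n, get_p n)] := by
  suffices h : ∀ n h t, tablesAux (n + 1) h t =
      tablesAux n h t ++ [(iterLen n h, iterPat n t)] by
    simpa [iterLen_one, iterPat_one] using h n 1 1
  intro n
  induction n with
  | zero => intro h t; simp [tablesAux, iterLen, iterPat]
  | succ m ih =>
    intro h t
    rw [show tablesAux (m + 1 + 1) h t = (h, t) :: tablesAux (m + 1) (2 * h + 3) (2 * t + 1)
      from rfl, ih (2 * h + 3) (2 * t + 1)]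
    simp [tablesAux, iterLen, iterPat]

theorem fd2 (x : Int) : PySem.Int.floordiv (2 * x) 2 = x := by
  rw [PySem.Int.floordiv_eq_ediv_of_pos (by norm_num)]
  omega

-- unfolding of A's port one level down, with the arithmetic on get_len simplified
theorem fA_succ (n : Nat) (q : Int) :
    fA (n + 1) q =
      if q = 1 then 0
      else if 1 < q ∧ q ≤ get_len n + 1 then fA n (q - 1)
      else if q = get_len n + 2 then get_p n + 1
      else if q ≤ 2 * get_len n + 2 then fA n (q - 2 - get_len n) + get_p n + 1
      else get_p n * 2 + 1 := by
  have h3 : get_len (n + 1) - 3 = 2 * get_len n := by rw [get_len]; ring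
  simp only [fA, h3, fd2]

theorem loopB_fA (n : Nat) : ∀ (q acc : Int),
    loopB (tablesAux n 1 1).reverse q acc = acc + fA n q := by
  induction n with
  | zero => intro q acc; simp [tablesAux, loopB, fA]
  | succ m ih =>
    intro q acc
    rw [tablesAux_succ, List.reverse_append, fA_succ]
    simp only [List.reverse_cons, List.reverse_nil, List.nil_append, List.singleton_append, loopB]
    split_ifs with h1 h2 h3 h4
    · ring
    · rw [ih]
    · ring
    · rw [show q - (get_len m + 2) = q - 2 - get_len m by ring, ih]; ring
    · ring

theorem f_eq_f_alt (l p : Int) : f l p = f_alt l p := by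
  rw [f, f_alt, loopB_fA]; ring


-- ===== VERDICT (by name: the statement is the Claim_ definition above) =====
theorem f_spec : Claim_equal_f := by
  intro l p _ _
  unfold Spec_f
  exact f_eq_f_alt l p
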